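-- pv_equiv track=rewrite | github.com/Rhumatooleur/Notes-rhumatologie | generate-nav.py | organize_by_category
-- ===== SOURCE A (Python) =====
-- def organize_by_category(files, root_dir):
--     """Organiser les fichiers par catégorie (dossier ou préfixe)."""
--     categories = {}
--     root_files = []
--
--     for file_info in files:
--         file_path = file_info['file']
--         parts = file_path.split('/')
--
--         if len(parts) > 1:
--             # C'est dans un sous-dossier
--             category = parts[0]
--             if category not in categories:
--                 categories[category] = []
--             categories[category].append(file_info)
--         else:
--             # À la racine
--             root_files.append(file_info)
--
--     return root_files, categories
-- ===== SOURCE B (Python) =====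
-- def organize_by_category(files, root_dir):
--     """Organiser les fichiers par catégorie (dossier ou préfixe)."""
--     tagged = [(f['file'].split('/'), f) for f in files]
--     root_files = [f for parts, f in tagged if len(parts) == 1]
--     sub = [(parts[0], f) for parts, f in tagged if len(parts) > 1]
--     categories = {c: [f for c2, f in sub if c2 == c]
--                   for c in dict.fromkeys(c for c, _ in sub)}
--     return root_files, categories
-- ===== Notes on version B (the rewrite author's own statement) =====
-- stated objective: alternative
-- what changed: Replaces A's single-pass incremental dict bucketing (membership test + in-place append per file) with a comprehension pipeline: tag each file with its split path, filter root files, then build the category dict by an ordered-unique key pass with one filtering scan per category.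
import Mathlib
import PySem

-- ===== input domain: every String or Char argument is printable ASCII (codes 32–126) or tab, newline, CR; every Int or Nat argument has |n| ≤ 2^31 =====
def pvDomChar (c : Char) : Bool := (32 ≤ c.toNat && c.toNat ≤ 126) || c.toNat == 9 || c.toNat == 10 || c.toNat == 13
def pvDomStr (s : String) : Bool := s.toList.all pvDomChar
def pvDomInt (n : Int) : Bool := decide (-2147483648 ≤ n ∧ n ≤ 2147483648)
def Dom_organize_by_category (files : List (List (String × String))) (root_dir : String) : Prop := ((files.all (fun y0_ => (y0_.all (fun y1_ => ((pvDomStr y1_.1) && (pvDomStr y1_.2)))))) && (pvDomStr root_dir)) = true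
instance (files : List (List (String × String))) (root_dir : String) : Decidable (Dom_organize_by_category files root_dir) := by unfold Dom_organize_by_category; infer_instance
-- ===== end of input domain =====

-- B rebuilds the grouping as a comprehension pipeline (tag, filter roots, ordered-unique keys, one filtering scan per key) instead of A's incremental dict bucketing; same return value (root_dir is unused by both).

-- ===== PORT A =====
-- fi['file'] : first-match association-list lookup; Pre_ guarantees the key is present (KeyError otherwise)
def pvFilePath (fi : List (String × String)) : String :=
  PySem.Dict.getD (PySem.Dict.mk fi) "file" ""

-- one iteration of A's loop; state = (categories, root_files)
def pvStepA (st : PySem.Dict String (List (List (String × String))) × List (List (String × String)))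
    (fi : List (String × String)) :
    PySem.Dict String (List (List (String × String))) × List (List (String × String)) :=
  let file_path := pvFilePath fi
  let parts := (PySem.Str.split? file_path "/").getD []   -- sep "/" ≠ "": split? is always `some` here
  if parts.length > 1 then
    let category := parts.headI                            -- parts[0]; split results are nonempty
    let cats := if st.1.contains category = false then st.1.insert category [] else st.1
    (cats.modify category [] (fun l => l ++ [fi]), st.2)
  else
    (st.1, st.2 ++ [fi])

def organize_by_category (files : List (List (String × String))) (root_dir : String) :
    (List (List (String × String))) × (List (String × List (List (String × String)))) :=
  let st := files.foldl pvStepA (PySem.Dict.empty, [])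
  (st.2, st.1.items)

-- ===== PORT B =====
def organize_by_category_alt (files : List (List (String × String))) (root_dir : String) :
    (List (List (String × String))) × (List (String × List (List (String × String)))) :=
  let tagged := files.map (fun f =>
    ((PySem.Str.split? (PySem.Dict.getD (PySem.Dict.mk f) "file" "") "/").getD [], f))
  let root_files := (tagged.filter (fun p => p.1.length == 1)).map (fun p => p.2)
  let sub := (tagged.filter (fun p => decide (p.1.length > 1))).map (fun p => (p.1.headI, p.2))
  let categories := (PySem.List.dedup (sub.map (fun q => q.1))).map
    (fun c => (c, (sub.filter (fun q => q.1 == c)).map (fun q => q.2)))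
  (root_files, categories)

-- ===== PRECONDITION & SPEC =====
-- Pre_ excludes exactly the inputs on which Python A raises KeyError: a file_info without a 'file' key.
def Pre_organize_by_category (files : List (List (String × String))) (root_dir : String) : Prop :=
  ∀ fi ∈ files, "file" ∈ fi.map Prod.fst
instance (files : List (List (String × String))) (root_dir : String) : Decidable (Pre_organize_by_category files root_dir) := by unfold Pre_organize_by_category; infer_instance

def pvWitness_organize_by_category : (List (List (String × String))) × String :=
  ([[("file", "notes/a.md")], [("file", "readme.md")], [("file", "notes/b.md")]], "root")

def Spec_organize_by_category (files : List (List (String × String))) (root_dir : String) (out : (List (List (String × String))) × (List (String × List (List (String × String))))) : Prop := out = organize_by_category_alt files root_dir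
instance (files : List (List (String × String))) (root_dir : String) (out : (List (List (String × String))) × (List (String × List (List (String × String))))) : Decidable (Spec_organize_by_category files root_dir out) := by unfold Spec_organize_by_category; infer_instance

-- ===== CLAIM (what is proved, stated in full; the proofs are below) =====
def Claim_equal_organize_by_category : Prop := ∀ (files : List (List (String × String))) (root_dir : String), Dom_organize_by_category files root_dir → Pre_organize_by_category files root_dir → Spec_organize_by_category files root_dir (organize_by_category files root_dir)

-- ===== LEMMAS AND PROOFS =====

-- the split of any string at "/" is nonempty
lemma pvGo_ne_nil (fuel : Nat) : ∀ (sep l cur : List Char) (acc : List (List Char)),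
    PySem.Chars.splitOn.go sep fuel l cur acc ≠ [] := by
  induction fuel with
  | zero => intro sep l cur acc; simp [PySem.Chars.splitOn.go]
  | succ n ih =>
    intro sep l cur acc
    cases l with
    | nil => simp [PySem.Chars.splitOn.go]
    | cons c rest =>
      rw [PySem.Chars.splitOn.go]
      split
      · exact ih _ _ _ _
      · exact ih _ _ _ _

lemma pvParts_ne_nil (s : String) : (PySem.Str.split? s "/").getD [] ≠ [] := by
  simp [PySem.Str.split?, PySem.Chars.split?, PySem.Chars.splitOn]
  intro h
  exact pvGo_ne_nil _ _ _ _ _ (by simpa using congrArg (List.map String.mk) h)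

-- shorthand used only by the proofs
def pvParts (fi : List (String × String)) : List String :=
  (PySem.Str.split? (pvFilePath fi) "/").getD []

-- A's ensure-then-append on a category equals a single `modify`
lemma pvInsert_modify (d : PySem.Dict String (List (List (String × String)))) (c : String)
    (fi : List (String × String)) :
    ((if d.contains c = false then d.insert c [] else d).modify c [] (fun l => l ++ [fi]))
      = d.modify c [] (fun l => l ++ [fi]) := by
  by_cases h : d.contains c = false
  · rw [if_pos h]
    simp only [PySem.Dict.modify]
    rw [PySem.Dict.getD_insert_self, PySem.Dict.insert_insert_self,
        PySem.Dict.getD_of_not_contains d _ h]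
  · simp [h]

-- A's fold splits into an independent categories fold and root list
lemma pvFoldA_split (files : List (List (String × String)))
    (d : PySem.Dict String (List (List (String × String)))) (r : List (List (String × String))) :
    files.foldl pvStepA (d, r)
      = (((files.filter (fun fi => decide ((pvParts fi).length > 1))).map
            (fun fi => ((pvParts fi).headI, fi))).foldl
            (fun d p => d.modify p.1 [] (fun l => l ++ [p.2])) d,
         r ++ files.filter (fun fi => !decide ((pvParts fi).length > 1))) := by
  induction files generalizing d r with
  | nil => simp
  | cons fi rest ih =>
    by_cases h : (pvParts fi).length > 1
    · simp only [List.foldl_cons, pvStepA, List.filter_cons, List.map_cons]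
      rw [show ((PySem.Str.split? (pvFilePath fi) "/").getD []) = pvParts fi from rfl]
      simp only [h, decide_true, if_pos, Bool.not_true, Bool.false_eq_true, if_false,
        List.foldl_cons]
      rw [pvInsert_modify]
      exact ih _ _
    · simp only [List.foldl_cons, pvStepA, List.filter_cons]
      rw [show ((PySem.Str.split? (pvFilePath fi) "/").getD []) = pvParts fi from rfl]
      simp only [h, decide_false, Bool.false_eq_true, if_false, Bool.not_false, if_pos]
      rw [ih]
      simp

-- ===== VERDICT (by name: the statement is the Claim_ definition above) =====
theorem organize_by_category_spec : Claim_equal_organize_by_category := by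
  intro files root_dir _ _
  unfold Spec_organize_by_category organize_by_category organize_by_category_alt
  rw [pvFoldA_split]
  simp only [List.filter_map, List.map_map, Function.comp_def]
  have hparts : ∀ fi : List (String × String),
      ((PySem.Str.split? (PySem.Dict.getD (PySem.Dict.mk fi) "file" "") "/").getD [])
        = pvParts fi := fun _ => rfl
  simp only [hparts]
  simp only [Prod.mk.injEq]
  refine ⟨?_, ?_⟩
  · -- root files
    simp only [List.nil_append, List.map_id']
    apply List.filter_congr
    intro fi _
    have h := pvParts_ne_nil (pvFilePath fi)
    rcases hx : pvParts fi with _ | ⟨a, t⟩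
    · exact absurd hx h
    · cases t <;> simp
  · -- categories
    set l := (files.filter (fun fi => decide ((pvParts fi).length > 1))).map
        (fun fi => ((pvParts fi).headI, fi)) with hl
    have hnd : (l.foldl (fun d p => d.modify p.1 [] (fun l => l ++ [p.2]))
        (PySem.Dict.empty : PySem.Dict String (List (List (String × String))))).keys.Nodup := by
      exact PySem.Dict.nodup_keys_foldl_modify_key l Prod.fst [] (fun _ p v => v ++ [p.2]) _
        PySem.Dict.nodup_keys_empty
    rw [PySem.Dict.items_eq_map_keys _ hnd []]
    have hkeys : (l.foldl (fun d p => d.modify p.1 [] (fun l => l ++ [p.2]))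
        (PySem.Dict.empty : PySem.Dict String (List (List (String × String))))).keys
        = PySem.List.dedup (l.map Prod.fst) := by
      rw [PySem.Dict.keys_foldl_modify_key l Prod.fst [] (fun _ p v => v ++ [p.2])]
      simp [PySem.Dict.keys_empty, PySem.Set.update_nil_left]
    rw [hkeys]
    have hml : List.map Prod.fst l = List.map (fun x => (pvParts x).headI)
        (List.filter (fun fi => decide ((pvParts fi).length > 1)) files) := by
      rw [hl]; simp [List.map_map, Function.comp_def]
    rw [← hml]
    apply List.map_congr_left
    intro c _
    rw [PySem.Dict.getD_foldl_modify_append]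
    simp only [PySem.Dict.getD_empty, List.nil_append, hl, List.filter_map, List.map_map,
      Function.comp_def, List.map_id']
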